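-- pv_equiv track=rewrite | github.com/ayoubzulfiqar/Leetcode-Medium | CinemaSeatAllocation/cinema_seat_allocation.py | maxNumberOfFamilies
-- ===== SOURCE A (Python) =====
-- from collections import defaultdict
--
-- def maxNumberOfFamilies(n: int, reservedSeats: list[list[int]]) -> int:
--     row_map = defaultdict(set)
--     for r, c in reservedSeats:
--         row_map[r].add(c)
--
--     total_groups = 2 * n
--
--     for row_num, reserved_set in row_map.items():
--         total_groups -= 2
--
--         can_place_left = True
--         for seat in [2, 3, 4, 5]:
--             if seat in reserved_set:
--                 can_place_left = False
--                 break
--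
--         can_place_middle = True
--         for seat in [4, 5, 6, 7]:
--             if seat in reserved_set:
--                 can_place_middle = False
--                 break
--
--         can_place_right = True
--         for seat in [6, 7, 8, 9]:
--             if seat in reserved_set:
--                 can_place_right = False
--                 break
--
--         groups_in_this_row = 0
--         if can_place_left and can_place_right:
--             groups_in_this_row = 2
--         elif can_place_left or can_place_middle or can_place_right:
--             groups_in_this_row = 1
--
--         total_groups += groups_in_this_row
--
--     return total_groups
-- ===== SOURCE B (Python) =====
-- def maxNumberOfFamilies(n: int, reservedSeats: list[list[int]]) -> int:
--     # No per-row sets: collect distinct rows in first-appearance order, then for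
--     # each affected row rescan the reservations building an 8-bit column mask
--     # (bit c-2 for columns 2..9) and test the three blocks against constant masks.
--     rows = []
--     for r, c in reservedSeats:
--         if r not in rows:
--             rows.append(r)
--     total = 2 * n
--     for row in rows:
--         mask = 0
--         for r, c in reservedSeats:
--             if r == row and 2 <= c <= 9:
--                 mask |= 1 << (c - 2)
--         left = mask & 15 == 0      # columns 2-5 free
--         middle = mask & 60 == 0    # columns 4-7 free
--         right = mask & 240 == 0    # columns 6-9 free
--         if left and right:
--             pass
--         elif left or middle or right:
--             total -= 1
--         else:
--             total -= 2
--     return total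
-- ===== Notes on version B (the rewrite author's own statement) =====
-- stated objective: alternative
-- what changed: B drops A's dict-of-reserved-seat-sets entirely: it collects the distinct affected rows in first-appearance order and, per row, rescans the reservation list once to build an 8-bit column bitmask (bit c-2 for columns 2..9) which it tests against the constant block masks 15/60/240 instead of scanning seat lists against a set.
import Mathlib
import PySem

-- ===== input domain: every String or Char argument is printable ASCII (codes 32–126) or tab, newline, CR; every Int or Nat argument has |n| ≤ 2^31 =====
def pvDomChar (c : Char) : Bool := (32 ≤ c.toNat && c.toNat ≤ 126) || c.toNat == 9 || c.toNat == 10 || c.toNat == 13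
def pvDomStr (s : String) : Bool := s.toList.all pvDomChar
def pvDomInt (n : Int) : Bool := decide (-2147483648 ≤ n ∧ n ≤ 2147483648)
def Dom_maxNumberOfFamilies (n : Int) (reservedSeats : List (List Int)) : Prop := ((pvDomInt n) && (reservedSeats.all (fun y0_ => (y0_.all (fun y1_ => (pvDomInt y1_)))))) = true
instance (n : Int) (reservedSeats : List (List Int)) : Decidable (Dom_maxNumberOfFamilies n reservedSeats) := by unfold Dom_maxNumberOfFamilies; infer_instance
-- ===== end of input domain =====

-- B drops A's dict of per-row reserved-seat sets: it collects the distinct affected rows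
-- in first-appearance order and, per row, rescans the reservations building an 8-bit
-- column bitmask tested against constant block masks (alternative decomposition, not faster).


-- ===== PORT A =====
-- row_map[r].add(c) on a defaultdict(set)
def pvA_step (d : PySem.Dict Int (PySem.Set Int)) (rc : List Int) :
    PySem.Dict Int (PySem.Set Int) :=
  match rc with
  | [r, c] => d.insert r (PySem.Set.add (d.getD r PySem.Set.empty) c)
  | _ => d   -- unreachable under Pre_ (Python raises ValueError on unpacking)

-- 'for seat in seats: if seat in reserved_set: flag = False; break'
def pvA_canPlace (seats : List Int) (s : PySem.Set Int) : Bool :=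
  seats.foldl (fun b seat => b && !(PySem.Set.contains s seat)) true

def pvA_rowGroups (s : PySem.Set Int) : Int :=
  let l := pvA_canPlace [2, 3, 4, 5] s
  let m := pvA_canPlace [4, 5, 6, 7] s
  let r := pvA_canPlace [6, 7, 8, 9] s
  if l && r then 2 else if l || m || r then 1 else 0

def maxNumberOfFamilies (n : Int) (reservedSeats : List (List Int)) : Int :=
  let rowMap := reservedSeats.foldl pvA_step PySem.Dict.empty
  rowMap.items.foldl (fun acc p => acc - 2 + pvA_rowGroups p.2) (2 * n)

-- ===== PORT B =====
-- 'if r not in rows: rows.append(r)'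
def pvRowsStep (acc : List Int) (rc : List Int) : List Int :=
  match rc with
  | [r, _] => if acc.contains r then acc else acc ++ [r]
  | _ => acc   -- unreachable under Pre_

def pvB_rows (rs : List (List Int)) : List Int := rs.foldl pvRowsStep []

-- 'if r == row and 2 <= c <= 9: mask |= 1 << (c - 2)'
def pvMaskStep (row : Int) (m : Int) (rc : List Int) : Int :=
  match rc with
  | [r, c] => if r == row && decide (2 ≤ c) && decide (c ≤ 9) then Int.lor m ((1 : Int) <<< (c - 2)) else m  -- 'mask | (1 << (c-2))'
  | _ => m   -- unreachable under Pre_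

def pvB_mask (rs : List (List Int)) (row : Int) : Int := rs.foldl (pvMaskStep row) 0

def maxNumberOfFamilies_alt (n : Int) (reservedSeats : List (List Int)) : Int :=
  (pvB_rows reservedSeats).foldl (fun total row =>
    let mask := pvB_mask reservedSeats row
    let left : Bool := Int.land mask 15 == 0    -- 'mask & 15 == 0'
    let middle : Bool := Int.land mask 60 == 0
    let right : Bool := Int.land mask 240 == 0
    if left && right then total
    else if left || middle || right then total - 1
    else total - 2) (2 * n)

-- ===== PRECONDITION & SPEC =====
-- Pre_ excludes exactly the inputs where Python's 'for r, c in reservedSeats'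
-- raises ValueError: an inner list whose length is not 2.
def Pre_maxNumberOfFamilies (n : Int) (reservedSeats : List (List Int)) : Prop :=
  ∀ rc ∈ reservedSeats, rc.length = 2
instance (n : Int) (reservedSeats : List (List Int)) : Decidable (Pre_maxNumberOfFamilies n reservedSeats) := by unfold Pre_maxNumberOfFamilies; infer_instance

def pvWitness_maxNumberOfFamilies : Int × List (List Int) := (3, [[1, 2], [1, 3], [2, 7]])

def Spec_maxNumberOfFamilies (n : Int) (reservedSeats : List (List Int)) (out : Int) : Prop := out = maxNumberOfFamilies_alt n reservedSeats
instance (n : Int) (reservedSeats : List (List Int)) (out : Int) : Decidable (Spec_maxNumberOfFamilies n reservedSeats out) := by unfold Spec_maxNumberOfFamilies; infer_instance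

-- ===== CLAIM (what is proved, stated in full; the proofs are below) =====
def Claim_equal_maxNumberOfFamilies : Prop := ∀ (n : Int) (reservedSeats : List (List Int)), Dom_maxNumberOfFamilies n reservedSeats → Pre_maxNumberOfFamilies n reservedSeats → Spec_maxNumberOfFamilies n reservedSeats (maxNumberOfFamilies n reservedSeats)

-- ===== LEMMAS AND PROOFS =====

-- ---- generic Nat/Int bitmask facts ----
theorem natAndZero (a k : Nat) : (a &&& k = 0) ↔ ∀ i, (a.testBit i && k.testBit i) = false := by
  constructor
  · intro h i; rw [← Nat.testBit_and, h, Nat.zero_testBit]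
  · intro h; apply Nat.eq_of_testBit_eq; intro i; rw [Nat.testBit_and, h, Nat.zero_testBit]

theorem natOrAndZero (a b k : Nat) : ((a ||| b) &&& k = 0) ↔ (a &&& k = 0 ∧ b &&& k = 0) := by
  simp only [natAndZero, ← forall_and]
  apply forall_congr'
  intro i
  rw [Nat.testBit_or]
  cases a.testBit i <;> cases b.testBit i <;> cases k.testBit i <;> simp

theorem intOrAndZero (m b K : Int) (hm : 0 ≤ m) (hb : 0 ≤ b) (hK : 0 ≤ K) :
    (Int.land (Int.lor m b) K = 0) ↔ (Int.land m K = 0 ∧ Int.land b K = 0) := by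
  obtain ⟨a, rfl⟩ := Int.eq_ofNat_of_zero_le hm
  obtain ⟨b', rfl⟩ := Int.eq_ofNat_of_zero_le hb
  obtain ⟨k, rfl⟩ := Int.eq_ofNat_of_zero_le hK
  show ((((a ||| b') &&& k : Nat) : Int) = 0) ↔ ((((a &&& k : Nat) : Int)) = 0 ∧ (((b' &&& k : Nat) : Int)) = 0)
  simp only [Int.natCast_eq_zero]
  exact natOrAndZero a b' k

theorem intOrNonneg (m b : Int) (hm : 0 ≤ m) (hb : 0 ≤ b) : 0 ≤ Int.lor m b := by
  obtain ⟨a, rfl⟩ := Int.eq_ofNat_of_zero_le hm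
  obtain ⟨b', rfl⟩ := Int.eq_ofNat_of_zero_le hb
  exact Int.natCast_nonneg _

theorem intZeroAnd (K : Int) (hK : 0 ≤ K) : Int.land 0 K = 0 := by
  obtain ⟨k, rfl⟩ := Int.eq_ofNat_of_zero_le hK
  show (((0 &&& k : Nat) : Int)) = 0
  simp
-- ---- canPlace facts ----
theorem canPlace_all (seats : List Int) (s : PySem.Set Int) :
    pvA_canPlace seats s = seats.all (fun x => !(PySem.Set.contains s x)) := by
  unfold pvA_canPlace
  induction seats with
  | nil => rfl
  | cons a l ih =>
      simp only [List.foldl_cons, List.all_cons]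
      rw [Bool.true_and]
      cases h : PySem.Set.contains s a with
      | true =>
          simp only [Bool.not_true, Bool.false_and]
          clear ih h
          induction l with
          | nil => rfl
          | cons b l ih => simpa using ih
      | false => simpa [h] using ih

theorem contains_add (s : PySem.Set Int) (c x : Int) :
    PySem.Set.contains (PySem.Set.add s c) x = (PySem.Set.contains s x || x == c) := by
  by_cases hx : x = c
  · subst hx
    simp [PySem.Set.contains, PySem.Set.mem_add]
  · simp [PySem.Set.contains, PySem.Set.mem_add, hx]

theorem canPlace_add (seats : List Int) (s : PySem.Set Int) (c : Int) :
    pvA_canPlace seats (PySem.Set.add s c) = (pvA_canPlace seats s && !(seats.contains c)) := by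
  simp only [canPlace_all]
  induction seats with
  | nil => simp
  | cons a l ih =>
      simp only [List.all_cons, contains_add, List.contains_cons]
      simp only [contains_add] at ih
      rw [ih]
      have he : (c == a) = (a == c) := by
        by_cases h : a = c
        · simp [h]
        · have h' : ¬ c = a := fun hh => h hh.symm
          simp [h, h']
      rw [he]
      cases (a == c) <;> cases PySem.Set.contains s a <;>
        cases (l.all fun x => !PySem.Set.contains s x) <;> cases l.contains c <;> simp

theorem canPlace_empty (seats : List Int) :
    pvA_canPlace seats PySem.Set.empty = true := by
  rw [canPlace_all]
  simp [PySem.Set.contains, PySem.Set.empty]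

-- ---- per-row fold characterisations ----
-- the set A's dict accumulates for a fixed row, as a direct fold
def pvColsStep (row : Int) (s : PySem.Set Int) (rc : List Int) : PySem.Set Int :=
  match rc with
  | [r, c] => if r == row then PySem.Set.add s c else s
  | _ => s

def pvColsF (rs : List (List Int)) (row : Int) (s : PySem.Set Int) : PySem.Set Int :=
  rs.foldl (pvColsStep row) s

-- B's mask test is A's canPlace, for each of the three blocks
theorem maskInv (row K : Int) (seats : List Int) (hK : 0 ≤ K)
    (hseats : ∀ c ∈ seats, 2 ≤ c ∧ c ≤ 9)
    (hbit : ∀ c : Int, 2 ≤ c → c ≤ 9 →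
      ((Int.land ((1 : Int) <<< (c - 2)) K = 0) ↔ ¬ c ∈ seats))
    (hbitpos : ∀ c : Int, 2 ≤ c → c ≤ 9 → 0 ≤ ((1 : Int) <<< (c - 2))) :
    ∀ (rs : List (List Int)) (s : PySem.Set Int) (m : Int), 0 ≤ m →
      ((Int.land m K = 0) ↔ pvA_canPlace seats s = true) →
      0 ≤ rs.foldl (pvMaskStep row) m ∧
        ((Int.land (rs.foldl (pvMaskStep row) m) K = 0) ↔
          pvA_canPlace seats (rs.foldl (pvColsStep row) s) = true) := by
  intro rs
  induction rs with
  | nil => intro s m hm h; exact ⟨hm, h⟩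
  | cons rc rs ih =>
      intro s m hm h
      simp only [List.foldl_cons]
      match rc with
      | [] => exact ih s m hm h
      | [_] => exact ih s m hm h
      | (r :: c :: x :: l) => exact ih s m hm h
      | [r, c] =>
        show 0 ≤ rs.foldl (pvMaskStep row) (pvMaskStep row m [r, c]) ∧ _
        simp only [pvMaskStep, pvColsStep]
        by_cases hr : r = row
        · simp only [hr, BEq.rfl, Bool.true_and, if_true]
          by_cases hc : 2 ≤ c ∧ c ≤ 9
          · have hb := hbit c hc.1 hc.2
            have hbp := hbitpos c hc.1 hc.2
            rw [if_pos (by simp [hc.1, hc.2])]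
            apply ih
            · exact intOrNonneg _ _ hm hbp
            · rw [intOrAndZero _ _ _ hm hbp hK, canPlace_add, h, hb]
              constructor
              · rintro ⟨h1, h2⟩
                simp only [h1, Bool.true_and, Bool.not_eq_true']
                simpa using h2
              · intro hh
                rcases Bool.and_eq_true_iff.mp hh with ⟨h1, h2⟩
                rw [Bool.not_eq_true'] at h2
                exact ⟨h1, by simpa using h2⟩
          · rw [if_neg (by simp only [Bool.and_eq_true, decide_eq_true_eq]; tauto)]
            apply ih _ _ hm
            rw [canPlace_add, h]
            have hnm : c ∉ seats := fun hmem => hc ⟨(hseats c hmem).1, (hseats c hmem).2⟩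
            have hcf : seats.contains c = false := by simpa using hnm
            rw [hcf]
            simp
        · have hrr : (r == row) = false := by simpa using hr
          rw [if_neg (by simp [hrr]), if_neg (by simp [hrr])]
          exact ih s m hm h

-- ---- A's dict, characterised by B's distinct-row list ----
theorem mapped_get? {α : Type} (L : List Int) (f : Int → α) (k : Int) :
    (PySem.Dict.mk (L.map (fun r => (r, f r)))).get? k
      = if L.contains k then some (f k) else none := by
  induction L with
  | nil => simp [PySem.Dict.get?]
  | cons a L ih =>
      simp only [List.map_cons]
      rw [PySem.Dict.get?_mk_cons]
      by_cases h : a = k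
      · subst h; simp
      · have h1 : (a == k) = false := by simpa using h
        have hka : ¬ k = a := fun hh => h hh.symm
        simp [h1, hka, ih]

theorem mapped_getD (L : List Int) (f : Int → PySem.Set Int) (k : Int) :
    (PySem.Dict.mk (L.map (fun r => (r, f r)))).getD k PySem.Set.empty
      = if L.contains k then f k else PySem.Set.empty := by
  rw [PySem.Dict.getD_eq_get?_getD, mapped_get?]
  by_cases h : k ∈ L <;> simp [h]

theorem mapped_contains {α : Type} (L : List Int) (f : Int → α) (k : Int) :
    (PySem.Dict.mk (L.map (fun r => (r, f r)))).contains k = L.contains k := by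
  rw [PySem.Dict.contains_eq_isSome_get?, mapped_get?]
  by_cases h : k ∈ L <;> simp [h]

theorem rows_mono (l : List (List Int)) : ∀ (acc : List Int) (x : Int),
    x ∈ acc → x ∈ l.foldl pvRowsStep acc := by
  induction l with
  | nil => intro acc x hx; exact hx
  | cons rc l ih =>
      intro acc x hx
      apply ih
      unfold pvRowsStep
      match rc with
      | [] => exact hx
      | [_] => exact hx
      | (r :: c :: y :: t) => exact hx
      | [r, c] =>
          by_cases h : r ∈ acc
          · simpa [h] using hx
          · simp [h, hx]

theorem mem_rows (l : List (List Int)) : ∀ (acc : List Int) (r c : Int),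
    [r, c] ∈ l → r ∈ l.foldl pvRowsStep acc := by
  induction l with
  | nil => intro acc r c h; cases h
  | cons rc l ih =>
      intro acc r c h
      rcases List.mem_cons.mp h with h | h
      · subst h
        simp only [List.foldl_cons]
        apply rows_mono
        simp only [pvRowsStep]
        by_cases hc : r ∈ acc
        · simpa [hc] using hc
        · simp [hc]
      · exact ih _ r c h

theorem colsF_nil (l : List (List Int)) : ∀ (r : Int) (s : PySem.Set Int),
    (∀ c, [r, c] ∉ l) → l.foldl (pvColsStep r) s = s := by
  induction l with
  | nil => intro r s _; rfl
  | cons rc l ih =>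
      intro r s h
      simp only [List.foldl_cons]
      have hstep : pvColsStep r s rc = s := by
        unfold pvColsStep
        match rc with
        | [] => rfl
        | [_] => rfl
        | (r' :: c' :: y :: t) => rfl
        | [r', c'] =>
            by_cases hr : r' = r
            · subst hr
              exact (h c' (by simp)).elim
            · simp [show (r' == r) = false by simpa using hr]
      rw [hstep]
      exact ih r s fun c hc => h c (List.mem_cons_of_mem _ hc)

theorem build_items (rs : List (List Int)) :
    (rs.foldl pvA_step PySem.Dict.empty).items
      = (pvB_rows rs).map (fun r => (r, rs.foldl (pvColsStep r) PySem.Set.empty)) := by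
  induction rs using List.reverseRecOn with
  | nil => rfl
  | append_singleton l rc ih =>
      unfold pvB_rows at *
      rw [List.foldl_append, List.foldl_append]
      have hcols : ∀ r : Int, (l ++ [rc]).foldl (pvColsStep r) PySem.Set.empty
          = pvColsStep r (l.foldl (pvColsStep r) PySem.Set.empty) rc := by
        intro r; rw [List.foldl_append]; rfl
      simp only [hcols]
      have hD : l.foldl pvA_step PySem.Dict.empty
          = PySem.Dict.mk ((l.foldl pvRowsStep []).map
              (fun r => (r, l.foldl (pvColsStep r) PySem.Set.empty))) := by
        apply PySem.Dict.ext
        exact ih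
      match rc with
      | [] => simpa using ih
      | [x] => simpa using ih
      | (r :: c :: y :: t) => simpa using ih
      | [r, c] =>
          simp only [List.foldl_cons, List.foldl_nil, pvA_step, pvRowsStep]
          rw [hD, mapped_getD]
          set L := l.foldl pvRowsStep [] with hL
          by_cases hc : L.contains r
          · rw [if_pos hc]
            rw [PySem.Dict.items_insert, mapped_contains]
            rw [if_pos hc, if_pos hc]
            show (L.map _).map _ = _
            rw [List.map_map]
            apply List.map_congr_left
            intro x _
            by_cases hx : x = r
            · subst hx
              simp [pvColsStep]
            · have h1 : (x == r) = false := by simpa using hx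
              have h2 : (r == x) = false := by simpa using fun hh : r = x => hx hh.symm
              simp [pvColsStep, h2, hx]
          · rw [if_neg (by simpa using hc), if_neg (by simpa using hc)]
            rw [PySem.Dict.items_insert, mapped_contains]
            rw [if_neg (by simpa using hc)]
            show L.map _ ++ [(r, PySem.Set.add PySem.Set.empty c)] = _
            rw [List.map_append]
            congr 1
            · apply List.map_congr_left
              intro x hx
              have hxr : ¬ x = r := fun hh => (by simpa using hc : r ∉ L) (hh ▸ hx)
              have h2 : (r == x) = false := by simpa using fun hh : r = x => hxr hh.symm
              simp [pvColsStep, h2]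
            · have hnil : l.foldl (pvColsStep r) PySem.Set.empty = PySem.Set.empty := by
                apply colsF_nil
                intro c' hmem
                exact (by simpa using hc : r ∉ L) (mem_rows l [] r c' hmem)
              have hnil' : List.foldl (pvColsStep r) ([] : PySem.Set Int) l = ([] : PySem.Set Int) := hnil
              simp [pvColsStep, hnil']

-- ---- per-row equality of the two scoring rules ----
theorem maskTest (rs : List (List Int)) (row K : Int) (seats : List Int) (hK : 0 ≤ K)
    (hseats : ∀ c ∈ seats, 2 ≤ c ∧ c ≤ 9)
    (hbit : ∀ c : Int, 2 ≤ c → c ≤ 9 →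
      ((Int.land ((1 : Int) <<< (c - 2)) K = 0) ↔ ¬ c ∈ seats)) :
    (Int.land (pvB_mask rs row) K == 0)
      = pvA_canPlace seats (rs.foldl (pvColsStep row) PySem.Set.empty) := by
  have h := (maskInv row K seats hK hseats hbit
      (fun c h2 h9 => by interval_cases c <;> decide)
      rs PySem.Set.empty 0 le_rfl
      ⟨fun _ => canPlace_empty _, fun _ => intZeroAnd _ hK⟩).2
  rw [Bool.eq_iff_iff, beq_iff_eq]
  exact h

theorem rowEq (rs : List (List Int)) (row t : Int) :
    (let mask := pvB_mask rs row
     let left : Bool := Int.land mask 15 == 0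
     let middle : Bool := Int.land mask 60 == 0
     let right : Bool := Int.land mask 240 == 0
     if left && right then t
     else if left || middle || right then t - 1
     else t - 2)
      = t - 2 + pvA_rowGroups (rs.foldl (pvColsStep row) PySem.Set.empty) := by
  have b15 := maskTest rs row 15 [2, 3, 4, 5] (by decide) (by decide)
      (fun c h2 h9 => by interval_cases c <;> decide)
  have b60 := maskTest rs row 60 [4, 5, 6, 7] (by decide) (by decide)
      (fun c h2 h9 => by interval_cases c <;> decide)
  have b240 := maskTest rs row 240 [6, 7, 8, 9] (by decide) (by decide)
      (fun c h2 h9 => by interval_cases c <;> decide)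
  simp only [pvA_rowGroups, b15, b60, b240]
  cases pvA_canPlace [2, 3, 4, 5] (rs.foldl (pvColsStep row) PySem.Set.empty) <;>
    cases pvA_canPlace [4, 5, 6, 7] (rs.foldl (pvColsStep row) PySem.Set.empty) <;>
      cases pvA_canPlace [6, 7, 8, 9] (rs.foldl (pvColsStep row) PySem.Set.empty) <;>
        simp <;> omega

theorem foldl_ext {α β : Type} (f g : β → α → β) (h : ∀ b a, f b a = g b a) :
    ∀ (l : List α) (b : β), l.foldl f b = l.foldl g b := by
  intro l
  induction l with
  | nil => intro b; rfl
  | cons a l ih => intro b; simp only [List.foldl_cons, h]; exact ih _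

-- ===== VERDICT (by name: the statement is the Claim_ definition above) =====
theorem maxNumberOfFamilies_spec : Claim_equal_maxNumberOfFamilies := by
  intro n rs _ _
  show maxNumberOfFamilies n rs = maxNumberOfFamilies_alt n rs
  have hA : maxNumberOfFamilies n rs
      = ((rs.foldl pvA_step PySem.Dict.empty).items).foldl
          (fun acc p => acc - 2 + pvA_rowGroups p.2) (2 * n) := rfl
  have hB : maxNumberOfFamilies_alt n rs
      = (pvB_rows rs).foldl
          (fun total row =>
            let mask := pvB_mask rs row
            let left : Bool := Int.land mask 15 == 0
            let middle : Bool := Int.land mask 60 == 0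
            let right : Bool := Int.land mask 240 == 0
            if left && right then total
            else if left || middle || right then total - 1
            else total - 2) (2 * n) := rfl
  rw [hA, hB, build_items, List.foldl_map]
  exact foldl_ext _ _ (fun t row => (rowEq rs row t).symm) _ _
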